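-- pv_equiv track=rewrite | github.com/JohnnyDHo/wikipedia-speedruns | apis/community_prompts_api.py | interleave_pending_prompts
-- ===== SOURCE A (Python) =====
-- def interleave_pending_prompts(prompts_sql_output, tcol="submitted_time", ucol="username", N=10):
--
--     if len(prompts_sql_output) <= N: return prompts_sql_output
--
--     user_map = {}
--     for item in prompts_sql_output:
--         if item[ucol] in user_map: user_map[item[ucol]].append(item)
--         else: user_map[item[ucol]] = [item]
--     for user in user_map:
--         user_map[user].sort(key=lambda x: x[tcol])
--
--     output = []
--
--     while len(output) < N:
--         for user in user_map:
--             if len(user_map[user]):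
--                 output.append(user_map[user].pop(0))
--
--     return output
-- ===== SOURCE B (Python) =====
-- def interleave_pending_prompts(prompts_sql_output, tcol="submitted_time", ucol="username", N=10):
--     if len(prompts_sql_output) <= N:
--         return prompts_sql_output
--     order = []
--     groups = {}
--     for item in prompts_sql_output:
--         u = item[ucol]
--         if u not in groups:
--             groups[u] = []
--             order.append(u)
--         groups[u].append(item)
--     K = len(order)
--     flat = []
--     for ui, u in enumerate(order):
--         for r, item in enumerate(sorted(groups[u], key=lambda x: x[tcol])):
--             flat.append((r, ui, item))
--     flat.sort(key=lambda t: t[0] * K + t[1])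
--     if N <= 0:
--         return []
--     rstar = flat[N - 1][0]
--     return [item for (r, ui, item) in flat if r <= rstar]
-- ===== Notes on version B (the rewrite author's own statement) =====
-- stated objective: alternative
-- what changed: Keeps the grouping-by-user and per-user stable sort, but replaces the destructive while/pop(0) round-robin loop with a non-destructive one: every grouped item is annotated with (round index, user first-appearance index), the flat list is stably sorted once by the scalar rank round*K+user, and all items whose round is at most the round of the N-th item are kept (matching A's completion of the final round past N).
import Mathlib
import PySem

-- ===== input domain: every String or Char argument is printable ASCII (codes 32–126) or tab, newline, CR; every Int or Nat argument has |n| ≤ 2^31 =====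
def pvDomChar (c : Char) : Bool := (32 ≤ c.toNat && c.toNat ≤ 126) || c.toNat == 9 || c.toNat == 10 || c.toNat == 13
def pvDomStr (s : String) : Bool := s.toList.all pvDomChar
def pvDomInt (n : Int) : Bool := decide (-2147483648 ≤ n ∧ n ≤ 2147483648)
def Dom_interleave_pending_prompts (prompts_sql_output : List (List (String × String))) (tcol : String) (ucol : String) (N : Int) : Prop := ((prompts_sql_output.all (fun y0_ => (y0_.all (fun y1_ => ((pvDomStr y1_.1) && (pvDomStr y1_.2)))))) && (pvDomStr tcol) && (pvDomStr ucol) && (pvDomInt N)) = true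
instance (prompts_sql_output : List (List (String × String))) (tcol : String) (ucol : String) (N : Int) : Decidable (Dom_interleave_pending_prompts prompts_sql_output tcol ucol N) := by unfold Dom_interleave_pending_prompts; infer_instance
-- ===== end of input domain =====

-- B replaces A's round-robin pop loop by annotating each grouped item with (round, user-order)
-- and taking one stable sort by the scalar rank round*K+user; objective: alternative algorithm.
-- Both ports use the same total item[k] accessor; missing keys (Python KeyError) are excluded by Pre_.

-- item[k] on a dict-valued row; total form, exact under Pre_ (KeyError excluded there)
def pvItemGet (item : List (String × String)) (k : String) : String :=
  ((PySem.Dict.mk item).get? k).getD ""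

-- ===== PORT A =====

-- the grouping loop: `if item[ucol] in user_map: append else: [item]`
def pvA_group (ps : List (List (String × String))) (ucol : String) :
    PySem.Dict String (List (List (String × String))) :=
  ps.foldl (fun m item =>
    match m.get? (pvItemGet item ucol) with
    | some l => m.insert (pvItemGet item ucol) (l ++ [item])
    | none   => m.insert (pvItemGet item ucol) [item]) PySem.Dict.empty

-- one pass of `for user in user_map: if len(...): output.append(user_map[user].pop(0))`
def pvA_pass (m : PySem.Dict String (List (List (String × String))))
    (out : List (List (String × String))) :
    PySem.Dict String (List (List (String × String))) × List (List (String × String)) :=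
  m.keys.foldl (fun st u =>
    match st.1.get? u with
    | some (x :: rest) => (st.1.insert u rest, st.2 ++ [x])
    | _ => st) (m, out)

-- the `while len(output) < N` loop; one fuel unit per pass (ps.length passes always suffice:
-- each pass appends at least one item while the condition holds, or is a no-op forever)
def pvA_loop (fuel : Nat) (m : PySem.Dict String (List (List (String × String))))
    (out : List (List (String × String))) (N : Int) : List (List (String × String)) :=
  match fuel with
  | 0 => out
  | Nat.succ f =>
    if (out.length : Int) < N then
      pvA_loop f (pvA_pass m out).1 (pvA_pass m out).2 N
    else out

def interleave_pending_prompts (prompts_sql_output : List (List (String × String)))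
    (tcol : String) (ucol : String) (N : Int) : List (List (String × String)) :=
  if (prompts_sql_output.length : Int) ≤ N then prompts_sql_output
  else
    let m := pvA_group prompts_sql_output ucol
    let m2 := m.keys.foldl (fun acc u =>
      acc.modify u [] (fun l => PySem.List.sorted l (fun x => pvItemGet x tcol) false)) m
    pvA_loop prompts_sql_output.length m2 [] N

-- ===== PORT B =====

def interleave_pending_prompts_alt (prompts_sql_output : List (List (String × String)))
    (tcol : String) (ucol : String) (N : Int) : List (List (String × String)) :=
  if (prompts_sql_output.length : Int) ≤ N then prompts_sql_output
  else
    let st := prompts_sql_output.foldl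
      (fun (st : List String × PySem.Dict String (List (List (String × String)))) item =>
        let u := pvItemGet item ucol
        let st' := if st.2.contains u then st
                   else (st.1 ++ [u], st.2.insert u ([] : List (List (String × String))))
        (st'.1, st'.2.modify u [] (fun l => l ++ [item])))
      ([], PySem.Dict.empty)
    let K : Int := st.1.length
    let flat := (PySem.List.enumerate st.1).foldl
      (fun acc p =>
        acc ++ (PySem.List.enumerate
            (PySem.List.sorted (st.2.getD p.2 []) (fun x => pvItemGet x tcol) false)).map
          (fun q => (q.1, p.1, q.2)))
      ([] : List (Int × Int × List (String × String)))
    let flatS := PySem.List.sorted flat (fun t => t.1 * K + t.2.1) false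
    if N ≤ 0 then []
    else
      let rstar := (PySem.List.pyGetD flatS (N - 1) (0, 0, [])).1
      (flatS.filter (fun t => t.1 ≤ rstar)).map (fun t => t.2.2)

-- ===== PRECONDITION & SPEC =====

-- Pre_ excludes exactly the inputs where Python A raises KeyError: when more rows than N,
-- every row must contain both the ucol and the tcol key (B raises there too).
def Pre_interleave_pending_prompts (prompts_sql_output : List (List (String × String)))
    (tcol : String) (ucol : String) (N : Int) : Prop :=
  (prompts_sql_output.length : Int) ≤ N ∨
    ∀ item ∈ prompts_sql_output,
      ((PySem.Dict.mk item).get? ucol).isSome ∧ ((PySem.Dict.mk item).get? tcol).isSome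

instance (prompts_sql_output : List (List (String × String))) (tcol : String) (ucol : String)
    (N : Int) : Decidable (Pre_interleave_pending_prompts prompts_sql_output tcol ucol N) := by
  unfold Pre_interleave_pending_prompts; infer_instance

def pvWitness_interleave_pending_prompts :
    (List (List (String × String))) × String × String × Int :=
  ([[("u", "a"), ("t", "1")], [("u", "b"), ("t", "2")]], "t", "u", 1)

def Spec_interleave_pending_prompts (prompts_sql_output : List (List (String × String)))
    (tcol : String) (ucol : String) (N : Int) (out : List (List (String × String))) : Prop :=
  out = interleave_pending_prompts_alt prompts_sql_output tcol ucol N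

instance (prompts_sql_output : List (List (String × String))) (tcol : String) (ucol : String)
    (N : Int) (out : List (List (String × String))) :
    Decidable (Spec_interleave_pending_prompts prompts_sql_output tcol ucol N out) := by
  unfold Spec_interleave_pending_prompts; infer_instance

-- ===== CLAIM =====

def Claim_equal_interleave_pending_prompts : Prop :=
  ∀ (prompts_sql_output : List (List (String × String))) (tcol : String) (ucol : String) (N : Int),
    Dom_interleave_pending_prompts prompts_sql_output tcol ucol N →
    Pre_interleave_pending_prompts prompts_sql_output tcol ucol N →
    Spec_interleave_pending_prompts prompts_sql_output tcol ucol N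
      (interleave_pending_prompts prompts_sql_output tcol ucol N)

-- ===== LEMMAS AND PROOFS =====

-- ---------- generic list lemmas ----------

lemma pv_flatMap_append_perm {A B : Type} (l : List A) (f g : A → List B) :
    (l.flatMap fun x => f x ++ g x).Perm (l.flatMap f ++ l.flatMap g) := by
  induction l with
  | nil => simp
  | cons x l ih =>
    simp only [List.flatMap_cons, List.append_assoc]
    refine List.Perm.append_left (f x) ?_
    refine List.Perm.trans (List.Perm.append_left (g x) ih) ?_
    exact List.perm_append_comm_assoc (g x) (l.flatMap f) (l.flatMap g)

lemma pv_flatMap_toList_eq_filterMap {A B : Type} (l : List A) (f : A → Option B) :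
    (l.flatMap fun a => (f a).toList) = l.filterMap f := by
  induction l with
  | nil => simp
  | cons x l ih => cases hx : f x <;> simp [hx, ih]

lemma pv_sum_map_update {A : Type} (us : List A) (u : A) (f g : A → Nat) :
    us.Nodup → u ∈ us → (∀ v ∈ us, v ≠ u → g v = f v) → g u = f u + 1 →
    (us.map g).sum = (us.map f).sum + 1 := by
  induction us with
  | nil => intro _ h; cases h
  | cons v us ih =>
    intro hnd hmem hfg hg
    rcases List.mem_cons.mp hmem with h | h
    · subst h
      have hrest : us.map g = us.map f := by
        refine List.map_congr_left (fun w hw => hfg w (List.mem_cons_of_mem _ hw) ?_)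
        intro he; subst he; exact (List.nodup_cons.mp hnd).1 hw
      simp [hrest, hg]; omega
    · have hvu : v ≠ u := by
        intro he; subst he; exact (List.nodup_cons.mp hnd).1 h
      have hv : g v = f v := hfg v (List.mem_cons_self) hvu
      have := ih (List.nodup_cons.mp hnd).2 h
        (fun w hw => hfg w (List.mem_cons_of_mem _ hw)) hg
      simp [hv, this]; omega

-- ---------- rounds machinery ----------

lemma pv_sum_heads_tails {I : Type} (r : Int) (rows : List (Int × List I)) :
    (rows.map fun p => p.2.length).sum
      = (rows.filterMap fun p => p.2.head?.map fun x => (r, p.1, x)).length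
        + ((rows.map fun p => (p.1, p.2.tail)).map fun p => p.2.length).sum := by
  induction rows with
  | nil => simp
  | cons p rows ih =>
    cases hp : p.2 with
    | nil => simp [hp, ih]
    | cons a l => simp [hp, ih]; omega

lemma pv_sum_tails_lt {I : Type} (rows : List (Int × List I)) (p0 : Int × List I)
    (hmem : p0 ∈ rows) (hne : p0.2 ≠ []) :
    ((rows.map fun p => (p.1, p.2.tail)).map fun p => p.2.length).sum
      < (rows.map fun p => p.2.length).sum := by
  rw [List.map_map]
  refine List.sum_lt_sum _ _ (fun p _ => ?_) ⟨p0, hmem, ?_⟩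
  · simp [Function.comp, List.length_tail]
  · have : p0.2.length ≠ 0 := by simpa [List.length_eq_zero_iff] using hne
    simp [Function.comp, List.length_tail]; omega

lemma pv_sum_tails_lt0 {I : Type} (rows : List (List I)) (l0 : List I)
    (hmem : l0 ∈ rows) (hne : l0 ≠ []) :
    ((rows.map List.tail).map List.length).sum < (rows.map List.length).sum := by
  rw [List.map_map]
  refine List.sum_lt_sum _ _ (fun l _ => ?_) ⟨l0, hmem, ?_⟩
  · simp [Function.comp, List.length_tail]
  · have : l0.length ≠ 0 := by simpa [List.length_eq_zero_iff] using hne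
    simp [Function.comp, List.length_tail]; omega

-- items of the first rounds, until at least n items are emitted (the shape of A's while loop)
def pvTakeRounds {I : Type} (n : Int) (rows : List (List I)) : List I :=
  if h : n ≤ 0 ∨ rows.filterMap List.head? = [] then []
  else
    rows.filterMap List.head?
      ++ pvTakeRounds (n - (rows.filterMap List.head?).length) (rows.map List.tail)
termination_by (rows.map List.length).sum
decreasing_by
  simp only [List.map_subtype, List.unattach_attach]
  push_neg at h
  obtain ⟨t, ht⟩ := List.exists_mem_of_ne_nil _ h.2
  obtain ⟨l0, hl0, hh⟩ := List.mem_filterMap.mp ht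
  exact pv_sum_tails_lt0 rows l0 hl0 (by intro he; subst he; simp at hh)

-- all rounds of user-annotated rows, column-major, each cell annotated (round, user index, item)
def pvColJoin {I : Type} (r : Int) (rows : List (Int × List I)) : List (Int × Int × I) :=
  if h : rows.filterMap (fun p => p.2.head?.map fun x => (r, p.1, x)) = [] then []
  else
    rows.filterMap (fun p => p.2.head?.map fun x => (r, p.1, x))
      ++ pvColJoin (r + 1) (rows.map fun p => (p.1, p.2.tail))
termination_by (rows.map fun p => p.2.length).sum
decreasing_by
  simp only [List.map_subtype, List.unattach_attach]
  obtain ⟨t, ht⟩ := List.exists_mem_of_ne_nil _ h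
  obtain ⟨p0, hp0, hh⟩ := List.mem_filterMap.mp ht
  refine pv_sum_tails_lt rows p0 hp0 ?_
  intro he; rw [he] at hh; simp at hh

lemma pv_takeRounds_nonpos {I : Type} (n : Int) (rows : List (List I)) (hn : n ≤ 0) :
    pvTakeRounds n rows = [] := by
  rw [pvTakeRounds, dif_pos (Or.inl hn)]

lemma pv_mem_colJoin {I : Type} (r : Int) (rows : List (Int × List I)) :
    ∀ t ∈ pvColJoin r rows, r ≤ t.1 ∧ ∃ p ∈ rows, t.2.1 = p.1 := by
  induction r, rows using pvColJoin.induct with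
  | case1 r rows h => rw [pvColJoin, dif_pos h]; intro t ht; cases ht
  | case2 r rows h ih =>
    simp only [List.map_subtype, List.unattach_attach] at ih
    rw [pvColJoin, dif_neg h]
    intro t ht
    rcases List.mem_append.mp ht with hmem | hmem
    · obtain ⟨p, hp, hf⟩ := List.mem_filterMap.mp hmem
      obtain ⟨x, hx, he⟩ := Option.map_eq_some_iff.mp hf
      subst he
      exact ⟨le_refl r, p, hp, rfl⟩
    · obtain ⟨hle, p', hp', he⟩ := ih t hmem
      obtain ⟨p, hp, hpe⟩ := List.mem_map.mp hp'
      exact ⟨by omega, p, hp, by rw [he, ← hpe]⟩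

lemma pv_length_colJoin {I : Type} (r : Int) (rows : List (Int × List I)) :
    (pvColJoin r rows).length = (rows.map fun p => p.2.length).sum := by
  induction r, rows using pvColJoin.induct with
  | case1 r rows h =>
    rw [pvColJoin, dif_pos h]
    symm
    apply List.sum_eq_zero
    intro x hx
    obtain ⟨p, hp, he⟩ := List.mem_map.mp hx
    have hnone := List.filterMap_eq_nil_iff.mp h p hp
    cases hp2 : p.2 with
    | nil => rw [← he, hp2]; rfl
    | cons a l => rw [hp2] at hnone; simp at hnone
  | case2 r rows h ih =>
    simp only [List.map_subtype, List.unattach_attach] at ih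
    rw [pvColJoin, dif_neg h, List.length_append, ih, pv_sum_heads_tails r rows]

lemma pv_pairwise_colJoin {I : Type} (K : Int) (r : Int) (rows : List (Int × List I))
    (hr : 0 ≤ r) (hb : ∀ p ∈ rows, 0 ≤ p.1 ∧ p.1 < K)
    (hp : rows.Pairwise fun p q => p.1 < q.1) :
    (pvColJoin r rows).Pairwise fun a b => a.1 * K + a.2.1 < b.1 * K + b.2.1 := by
  induction r, rows using pvColJoin.induct generalizing K with
  | case1 r rows h => rw [pvColJoin, dif_pos h]; exact List.Pairwise.nil
  | case2 r rows h ih =>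
    simp only [List.map_subtype, List.unattach_attach] at ih
    rw [pvColJoin, dif_neg h, List.pairwise_append]
    refine ⟨?_, ?_, ?_⟩
    · refine List.Pairwise.filterMap _ ?_ hp
      intro p q hpq a ha b hb
      obtain ⟨x, hx, hea⟩ := Option.map_eq_some_iff.mp ha
      obtain ⟨y, hy, heb⟩ := Option.map_eq_some_iff.mp hb
      subst hea heb
      simp only
      linarith
    · refine ih K (by omega) ?_ ?_
      · intro p hp'
        obtain ⟨q, hq, he⟩ := List.mem_map.mp hp'
        rw [← he]
        exact hb q hq
      · exact List.Pairwise.map _ (fun a b hab => hab) hp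
    · intro a ha b hb'
      obtain ⟨p, hp', hf⟩ := List.mem_filterMap.mp ha
      obtain ⟨x, hx, he⟩ := Option.map_eq_some_iff.mp hf
      subst he
      obtain ⟨hge, p', hp'', he'⟩ := pv_mem_colJoin _ _ b hb'
      obtain ⟨q, hq, heq⟩ := List.mem_map.mp hp''
      have hbq := hb q hq
      have hbp := hb p hp'
      have hb21 : b.2.1 = q.1 := by rw [he', ← heq]
      have h2 : (r + 1) * K ≤ b.1 * K :=
        mul_le_mul_of_nonneg_right (by omega) (by omega)
      simp only
      nlinarith [hbp.1, hbp.2, hbq.1, h2, hge]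

def pvRowMajor {I : Type} (r : Int) (rows : List (Int × List I)) : List (Int × Int × I) :=
  rows.flatMap fun p => (PySem.List.enumerate p.2 r).map fun q => (q.1, p.1, q.2)

lemma pv_perm_colJoin {I : Type} (r : Int) (rows : List (Int × List I)) :
    (pvColJoin r rows).Perm (pvRowMajor r rows) := by
  induction r, rows using pvColJoin.induct with
  | case1 r rows h =>
    rw [pvColJoin, dif_pos h]
    have hnil : pvRowMajor r rows = [] := by
      rw [pvRowMajor]
      apply List.flatMap_eq_nil_iff.mpr
      intro p hp
      have hnone := List.filterMap_eq_nil_iff.mp h p hp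
      cases hp2 : p.2 with
      | nil => simp [PySem.List.enumerate_nil]
      | cons a l => rw [hp2] at hnone; simp at hnone
    rw [hnil]
  | case2 r rows h ih =>
    simp only [List.map_subtype, List.unattach_attach] at ih
    rw [pvColJoin, dif_neg h]
    have hdec : pvRowMajor r rows
        = rows.flatMap fun p => ((p.2.head?.map fun x => (r, p.1, x)).toList
            ++ ((PySem.List.enumerate p.2.tail (r + 1)).map fun q => (q.1, p.1, q.2))) := by
      rw [pvRowMajor]
      congr 1
      funext p
      cases hp2 : p.2 with
      | nil => simp [PySem.List.enumerate_nil]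
      | cons a l => simp [PySem.List.enumerate_cons]
    rw [hdec]
    refine List.Perm.trans (List.Perm.append_left _ ih) ?_
    have h2 : pvRowMajor (r + 1) (rows.map fun p => (p.1, p.2.tail))
        = rows.flatMap fun p =>
            (PySem.List.enumerate p.2.tail (r + 1)).map fun q => (q.1, p.1, q.2) := by
      rw [pvRowMajor, List.flatMap_map]
    rw [h2, ← pv_flatMap_toList_eq_filterMap]
    exact (pv_flatMap_append_perm rows _ _).symm

lemma pv_colJoin_filter_take {I : Type} (dflt : Int × Int × I) :
    ∀ (r : Int) (rows : List (Int × List I)) (k : Nat),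
      k < (rows.map fun p => p.2.length).sum →
      ((pvColJoin r rows).filter fun t =>
          decide (t.1 ≤ ((pvColJoin r rows).getD k dflt).1)).map (fun t => t.2.2)
        = pvTakeRounds ((k : Int) + 1) (rows.map fun p => p.2) := by
  intro r rows
  induction r, rows using pvColJoin.induct with
  | case1 r rows h =>
    intro k hk
    exfalso
    have hl := pv_length_colJoin r rows
    rw [pvColJoin, dif_pos h] at hl
    simp only [List.length_nil] at hl
    omega
  | case2 r rows h ih =>
    simp only [List.map_subtype, List.unattach_attach] at ih
    intro k hk
    have hsum := pv_sum_heads_tails r rows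
    have hmapkey : (rows.filterMap fun p => p.2.head?.map fun x => (r, p.1, x)).map
        (fun t => t.2.2) = rows.filterMap fun p => p.2.head? := by
      rw [List.map_filterMap]
      congr 1
      funext p
      cases hp2 : p.2.head? <;> simp
    have hhs2 : (rows.map fun p => p.2).filterMap List.head?
        = rows.filterMap fun p => p.2.head? := by
      rw [List.filterMap_map]; rfl
    have hlen2 : (rows.filterMap fun p => p.2.head?).length
        = (rows.filterMap fun p => p.2.head?.map fun x => (r, p.1, x)).length := by
      rw [← hmapkey, List.length_map]
    have htails : (rows.map fun p => p.2).map List.tail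
        = (rows.map fun p => (p.1, p.2.tail)).map fun p => p.2 := by
      rw [List.map_map, List.map_map]; rfl
    have hlenpos : 0 < (rows.filterMap fun p => p.2.head?.map fun x => (r, p.1, x)).length :=
      List.length_pos_iff.mpr h
    rw [pvColJoin, dif_neg h]
    by_cases hk2 : k < (rows.filterMap fun p => p.2.head?.map fun x => (r, p.1, x)).length
    · rw [List.getD_append _ _ _ _ hk2]
      have hmem : (rows.filterMap fun p => p.2.head?.map fun x => (r, p.1, x)).getD k dflt
          ∈ rows.filterMap fun p => p.2.head?.map fun x => (r, p.1, x) := by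
        rw [List.getD_eq_getElem _ _ hk2]
        exact List.getElem_mem hk2
      have hr : ((rows.filterMap fun p => p.2.head?.map fun x => (r, p.1, x)).getD k dflt).1
          = r := by
        obtain ⟨p, hp, hf⟩ := List.mem_filterMap.mp hmem
        obtain ⟨x, hx, he⟩ := Option.map_eq_some_iff.mp hf
        rw [← he]
      rw [hr, List.filter_append]
      have hf1 : (rows.filterMap fun p => p.2.head?.map fun x => (r, p.1, x)).filter
          (fun t => decide (t.1 ≤ r)) = rows.filterMap fun p => p.2.head?.map fun x => (r, p.1, x) := by
        rw [List.filter_eq_self]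
        intro t ht
        obtain ⟨p, hp, hf⟩ := List.mem_filterMap.mp ht
        obtain ⟨x, hx, he⟩ := Option.map_eq_some_iff.mp hf
        rw [← he]
        simp
      have hf2 : (pvColJoin (r + 1) (rows.map fun p => (p.1, p.2.tail))).filter
          (fun t => decide (t.1 ≤ r)) = [] := by
        rw [List.filter_eq_nil_iff]
        intro t ht
        have := (pv_mem_colJoin _ _ t ht).1
        simp
        omega
      rw [hf1, hf2, List.append_nil, hmapkey]
      rw [pvTakeRounds, dif_neg]
      · rw [hhs2]
        have hz : (k : Int) + 1 - (rows.filterMap fun p => p.2.head?).length ≤ 0 := by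
          rw [hlen2]
          omega
        rw [pv_takeRounds_nonpos _ _ hz, List.append_nil]
      · rw [hhs2]
        push_neg
        refine ⟨by omega, ?_⟩
        intro hnil
        rw [hnil] at hlen2
        simp at hlen2
        omega
    · push_neg at hk2
      have hlc := pv_length_colJoin (r + 1) (rows.map fun p => (p.1, p.2.tail))
      have hk' : k - (rows.filterMap fun p => p.2.head?.map fun x => (r, p.1, x)).length
          < ((rows.map fun p => (p.1, p.2.tail)).map fun p => p.2.length).sum := by omega
      rw [List.getD_append_right _ _ _ _ hk2]
      have hmem : (pvColJoin (r + 1) (rows.map fun p => (p.1, p.2.tail))).getD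
            (k - (rows.filterMap fun p => p.2.head?.map fun x => (r, p.1, x)).length) dflt
          ∈ pvColJoin (r + 1) (rows.map fun p => (p.1, p.2.tail)) := by
        rw [List.getD_eq_getElem _ _ (by omega)]
        exact List.getElem_mem _
      have hge : r + 1 ≤ ((pvColJoin (r + 1) (rows.map fun p => (p.1, p.2.tail))).getD
            (k - (rows.filterMap fun p => p.2.head?.map fun x => (r, p.1, x)).length) dflt).1 :=
        (pv_mem_colJoin _ _ _ hmem).1
      rw [List.filter_append, List.map_append]
      have hf1 : (rows.filterMap fun p => p.2.head?.map fun x => (r, p.1, x)).filter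
          (fun t => decide (t.1 ≤ ((pvColJoin (r + 1) (rows.map fun p => (p.1, p.2.tail))).getD
            (k - (rows.filterMap fun p => p.2.head?.map fun x => (r, p.1, x)).length) dflt).1))
          = rows.filterMap fun p => p.2.head?.map fun x => (r, p.1, x) := by
        rw [List.filter_eq_self]
        intro t ht
        obtain ⟨p, hp, hf⟩ := List.mem_filterMap.mp ht
        obtain ⟨x, hx, he⟩ := Option.map_eq_some_iff.mp hf
        rw [← he, decide_eq_true_eq]
        show r ≤ _
        omega
      have hcond : ¬((k : Int) + 1 ≤ 0 ∨ (rows.map fun p => p.2).filterMap List.head? = []) := by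
        rw [hhs2]
        push_neg
        refine ⟨by omega, ?_⟩
        intro hnil
        rw [hnil] at hlen2
        simp at hlen2
        omega
      conv_rhs => rw [pvTakeRounds, dif_neg hcond]
      rw [hf1, hmapkey, ih _ hk', hhs2, htails]
      congr 2
      rw [hlen2]
      omega


-- ---------- grouping and dict lemmas ----------

-- canonical form of the grouping loop
def pvGroup (ps : List (List (String × String))) (ucol : String) :
    PySem.Dict String (List (List (String × String))) :=
  ps.foldl (fun m item => m.modify (pvItemGet item ucol) [] (fun l => l ++ [item]))
    PySem.Dict.empty

lemma pv_group_eq (ps : List (List (String × String))) (ucol : String) :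
    pvA_group ps ucol = pvGroup ps ucol := by
  rw [pvA_group, pvGroup]
  apply PySem.List.foldl_congr_mem
  intro m item _
  cases hg : m.get? (pvItemGet item ucol) with
  | some l =>
    simp only [PySem.Dict.modify, PySem.Dict.getD_of_get?_eq_some m [] hg]
  | none =>
    simp only [PySem.Dict.modify, PySem.Dict.getD_of_get?_eq_none m [] hg,
      List.nil_append]

lemma pv_group_nodup (ps : List (List (String × String))) (ucol : String) :
    (pvGroup ps ucol).keys.Nodup := by
  rw [pvGroup]
  exact PySem.Dict.nodup_keys_foldl_modify_key ps (fun item => pvItemGet item ucol) []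
    (fun _ item => fun l => l ++ [item]) PySem.Dict.empty
    (by rw [PySem.Dict.keys_empty]; exact List.nodup_nil)

lemma pv_bfold_step (ucol : String) (d : PySem.Dict String (List (List (String × String))))
    (item : List (String × String)) :
    ((if d.contains (pvItemGet item ucol) then (d.keys, d)
      else (d.keys ++ [pvItemGet item ucol], d.insert (pvItemGet item ucol) [])).1,
     (if d.contains (pvItemGet item ucol) then (d.keys, d)
      else (d.keys ++ [pvItemGet item ucol], d.insert (pvItemGet item ucol) [])).2.modify
        (pvItemGet item ucol) [] (fun l => l ++ [item]))
    = ((d.modify (pvItemGet item ucol) [] (fun l => l ++ [item])).keys,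
       d.modify (pvItemGet item ucol) [] (fun l => l ++ [item])) := by
  by_cases hc : d.contains (pvItemGet item ucol) = true
  · have hk : (d.modify (pvItemGet item ucol) [] (fun l => l ++ [item])).keys = d.keys := by
      rw [PySem.Dict.keys_modify, PySem.Dict.keys_insert_of_contains _ _ hc]
    rw [hk]
    simp [hc]
  · have hcf : d.contains (pvItemGet item ucol) = false := by simpa using hc
    have h1 : (d.insert (pvItemGet item ucol) []).modify (pvItemGet item ucol) []
        (fun l => l ++ [item]) = d.insert (pvItemGet item ucol) ([] ++ [item]) := by
      rw [PySem.Dict.modify, PySem.Dict.getD_insert_self, PySem.Dict.insert_insert_self]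
    have h2 : d.modify (pvItemGet item ucol) [] (fun l => l ++ [item])
        = d.insert (pvItemGet item ucol) ([] ++ [item]) := by
      rw [PySem.Dict.modify, PySem.Dict.getD_of_not_contains _ _ hcf]
    have hk : (d.modify (pvItemGet item ucol) [] (fun l => l ++ [item])).keys
        = d.keys ++ [pvItemGet item ucol] := by
      rw [h2, PySem.Dict.keys_insert_of_not_contains _ _ hcf]
    rw [hk, h2]
    simp [hcf, h1]

lemma pv_bfold_eq (ucol : String) :
    ∀ (ps : List (List (String × String)))
      (d : PySem.Dict String (List (List (String × String)))),
    ps.foldl (fun st item =>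
        ((if st.2.contains (pvItemGet item ucol) then st
          else (st.1 ++ [pvItemGet item ucol], st.2.insert (pvItemGet item ucol) [])).1,
         (if st.2.contains (pvItemGet item ucol) then st
          else (st.1 ++ [pvItemGet item ucol], st.2.insert (pvItemGet item ucol) [])).2.modify
            (pvItemGet item ucol) [] (fun l => l ++ [item])))
      (d.keys, d)
    = ((ps.foldl (fun m item => m.modify (pvItemGet item ucol) [] (fun l => l ++ [item])) d).keys,
       ps.foldl (fun m item => m.modify (pvItemGet item ucol) [] (fun l => l ++ [item])) d) := by
  intro ps
  induction ps with
  | nil => intro d; rfl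
  | cons item ps ih =>
    intro d
    rw [List.foldl_cons, List.foldl_cons, pv_bfold_step ucol d item,
      ih (d.modify (pvItemGet item ucol) [] (fun l => l ++ [item]))]

lemma pv_bfold_group (ucol : String) (ps : List (List (String × String))) :
    ps.foldl (fun st item =>
        ((if st.2.contains (pvItemGet item ucol) then st
          else (st.1 ++ [pvItemGet item ucol], st.2.insert (pvItemGet item ucol) [])).1,
         (if st.2.contains (pvItemGet item ucol) then st
          else (st.1 ++ [pvItemGet item ucol], st.2.insert (pvItemGet item ucol) [])).2.modify
            (pvItemGet item ucol) [] (fun l => l ++ [item])))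
      ([], PySem.Dict.empty)
    = ((pvGroup ps ucol).keys, pvGroup ps ucol) := by
  have h := pv_bfold_eq ucol ps PySem.Dict.empty
  rw [PySem.Dict.keys_empty] at h
  exact h

lemma pv_group_sum (ucol : String) : ∀ ps : List (List (String × String)),
    ((pvGroup ps ucol).keys.map (fun u => ((pvGroup ps ucol).getD u []).length)).sum
      = ps.length := by
  intro ps
  induction ps using List.reverseRecOn with
  | nil => simp [pvGroup, PySem.Dict.keys_empty]
  | append_singleton ps item ih =>
    have hnd : (pvGroup ps ucol).keys.Nodup := pv_group_nodup ps ucol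
    have hunf : pvGroup (ps ++ [item]) ucol
        = (pvGroup ps ucol).modify (pvItemGet item ucol) [] (fun l => l ++ [item]) := by
      rw [pvGroup, pvGroup, List.foldl_append, List.foldl_cons, List.foldl_nil]
    rw [hunf]
    by_cases hc : (pvGroup ps ucol).contains (pvItemGet item ucol) = true
    · have hk : ((pvGroup ps ucol).modify (pvItemGet item ucol) []
          (fun l => l ++ [item])).keys = (pvGroup ps ucol).keys := by
        rw [PySem.Dict.keys_modify, PySem.Dict.keys_insert_of_contains _ _ hc]
      rw [hk]
      have hupd := pv_sum_map_update (pvGroup ps ucol).keys (pvItemGet item ucol)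
        (fun w => ((pvGroup ps ucol).getD w []).length)
        (fun w => (((pvGroup ps ucol).modify (pvItemGet item ucol) []
            (fun l => l ++ [item])).getD w []).length)
        hnd ((PySem.Dict.contains_iff_mem_keys _ _).mp hc)
        (fun w _ hne => by simp only [PySem.Dict.getD_modify]; simp [hne])
        (by simp only [PySem.Dict.getD_modify]; simp)
      rw [hupd, ih, List.length_append]
      rfl
    · have hcf : (pvGroup ps ucol).contains (pvItemGet item ucol) = false := by simpa using hc
      have hnk : pvItemGet item ucol ∉ (pvGroup ps ucol).keys := by
        intro hmem
        rw [(PySem.Dict.contains_iff_mem_keys _ _).mpr hmem] at hcf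
        cases hcf
      have hk : ((pvGroup ps ucol).modify (pvItemGet item ucol) []
          (fun l => l ++ [item])).keys = (pvGroup ps ucol).keys ++ [pvItemGet item ucol] := by
        rw [PySem.Dict.keys_modify,
          PySem.Dict.keys_insert_of_not_contains _ _ hcf]
      rw [hk, List.map_append, List.sum_append]
      have hold : (pvGroup ps ucol).keys.map
          (fun w => (((pvGroup ps ucol).modify (pvItemGet item ucol) []
              (fun l => l ++ [item])).getD w []).length)
          = (pvGroup ps ucol).keys.map (fun w => ((pvGroup ps ucol).getD w []).length) := by
        refine List.map_congr_left (fun w hw => ?_)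
        simp only [PySem.Dict.getD_modify]
        rw [if_neg (fun (he : w = pvItemGet item ucol) => hnk (he ▸ hw))]
      rw [hold, ih]
      simp [PySem.Dict.getD_modify, PySem.Dict.getD_of_not_contains _ _ hcf]

-- ---------- the sorting pass over the keys ----------

lemma pv_sortfold_spec (f : List (List (String × String)) → List (List (String × String))) :
    ∀ (us : List String) (d : PySem.Dict String (List (List (String × String)))),
      us.Nodup → (∀ u ∈ us, d.contains u = true) →
    (us.foldl (fun acc u => acc.modify u [] f) d).keys = d.keys
    ∧ ∀ u', (us.foldl (fun acc u => acc.modify u [] f) d).getD u' []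
        = if u' ∈ us then f (d.getD u' []) else d.getD u' [] := by
  intro us
  induction us with
  | nil => exact fun d _ _ => ⟨rfl, fun u' => by simp⟩
  | cons u us ih =>
    intro d hnd hct
    have hcu : d.contains u = true := hct u (by simp)
    have hk1 : (d.modify u [] f).keys = d.keys := by
      rw [PySem.Dict.keys_modify, PySem.Dict.keys_insert_of_contains _ _ hcu]
    have hct' : ∀ w ∈ us, (d.modify u [] f).contains w = true := by
      intro w hw
      have hw' := hct w (List.mem_cons_of_mem _ hw)
      rw [PySem.Dict.contains_iff_mem_keys] at hw' ⊢
      rw [hk1]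
      exact hw'
    obtain ⟨ih1, ih2⟩ := ih (d.modify u [] f) (List.nodup_cons.mp hnd).2 hct'
    refine ⟨by rw [List.foldl_cons, ih1, hk1], fun u' => ?_⟩
    rw [List.foldl_cons, ih2 u']
    have hgm : (d.modify u [] f).getD u' [] = if u' = u then f (d.getD u []) else d.getD u' [] :=
      PySem.Dict.getD_modify d u u' [] f
    by_cases h1 : u' ∈ us
    · have hne : u' ≠ u := fun he => (List.nodup_cons.mp hnd).1 (he ▸ h1)
      simp [h1, hgm, hne]
    · by_cases h2 : u' = u
      · subst h2
        simp [h1, hgm]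
      · simp [h1, h2, hgm]

-- ---------- one round-robin pass ----------

lemma pv_pass_fold_spec :
    ∀ (us : List String) (m : PySem.Dict String (List (List (String × String))))
      (out : List (List (String × String))),
      us.Nodup → (∀ u ∈ us, m.contains u = true) →
    (us.foldl (fun st u =>
        match st.1.get? u with
        | some (x :: rest) => (st.1.insert u rest, st.2 ++ [x])
        | _ => st) (m, out)).2
      = out ++ us.filterMap (fun u => (m.getD u []).head?)
    ∧ (us.foldl (fun st u =>
        match st.1.get? u with
        | some (x :: rest) => (st.1.insert u rest, st.2 ++ [x])
        | _ => st) (m, out)).1.keys = m.keys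
    ∧ ∀ u', (us.foldl (fun st u =>
        match st.1.get? u with
        | some (x :: rest) => (st.1.insert u rest, st.2 ++ [x])
        | _ => st) (m, out)).1.getD u' []
        = if u' ∈ us then (m.getD u' []).tail else m.getD u' [] := by
  intro us
  induction us with
  | nil => exact fun m out _ _ => ⟨by simp, rfl, fun u' => by simp⟩
  | cons u us ih =>
    intro m out hnd hct
    have hcu : m.contains u = true := hct u (by simp)
    have hsome : ∃ v, m.get? u = some v := by
      have h := PySem.Dict.contains_eq_isSome_get? m u
      rw [hcu] at h
      exact Option.isSome_iff_exists.mp h.symm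
    obtain ⟨v, hv⟩ := hsome
    have hgD : m.getD u [] = v := PySem.Dict.getD_of_get?_eq_some m [] hv
    cases v with
    | nil =>
      simp only [List.foldl_cons, hv]
      obtain ⟨ih1, ih2, ih3⟩ := ih m out (List.nodup_cons.mp hnd).2
        (fun w hw => hct w (List.mem_cons_of_mem _ hw))
      refine ⟨?_, ih2, fun u' => ?_⟩
      · rw [ih1, List.filterMap_cons, hgD]
        rfl
      · rw [ih3 u']
        by_cases h1 : u' ∈ us
        · simp [h1]
        · by_cases h2 : u' = u
          · subst h2
            simp [h1, hgD]
          · simp [h1, h2]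
    | cons x rest =>
      simp only [List.foldl_cons, hv]
      have hunotin : u ∉ us := (List.nodup_cons.mp hnd).1
      have hct' : ∀ w ∈ us, (m.insert u rest).contains w = true := by
        intro w hw
        rw [PySem.Dict.contains_insert]
        rw [hct w (List.mem_cons_of_mem _ hw)]
        simp
      obtain ⟨ih1, ih2, ih3⟩ := ih (m.insert u rest) (out ++ [x])
        (List.nodup_cons.mp hnd).2 hct'
      have hgins : ∀ u', (m.insert u rest).getD u' [] =
          if u' = u then rest else m.getD u' [] :=
        fun u' => PySem.Dict.getD_insert m u u' rest []
      refine ⟨?_, ?_, fun u' => ?_⟩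
      · rw [ih1, List.filterMap_cons, hgD]
        have hcong : us.filterMap (fun w => ((m.insert u rest).getD w []).head?)
            = us.filterMap (fun w => (m.getD w []).head?) := by
          refine List.filterMap_congr (fun w hw => ?_)
          rw [hgins w, if_neg (fun (he : w = u) => hunotin (he ▸ hw))]
        rw [hcong]
        simp
      · rw [ih2, PySem.Dict.keys_insert_of_contains _ _ hcu]
      · rw [ih3 u']
        by_cases h2 : u' = u
        · subst h2
          rw [if_neg hunotin, hgins, if_pos rfl, if_pos (by simp), hgD]
          rfl
        · rw [hgins, if_neg h2]
          by_cases h1 : u' ∈ us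
          · simp [h1, h2]
          · simp [h1, h2]

lemma pv_pass_spec (m : PySem.Dict String (List (List (String × String))))
    (out : List (List (String × String))) (hnd : m.keys.Nodup) :
    (pvA_pass m out).2 = out ++ m.keys.filterMap (fun u => (m.getD u []).head?)
    ∧ (pvA_pass m out).1.keys = m.keys
    ∧ ∀ u', (pvA_pass m out).1.getD u' []
        = if u' ∈ m.keys then (m.getD u' []).tail else m.getD u' [] :=
  pv_pass_fold_spec m.keys m out hnd
    (fun u hu => (PySem.Dict.contains_iff_mem_keys m u).mpr hu)

-- ---------- the while loop ----------

lemma pv_loop_spin (N : Int) : ∀ (fuel : Nat)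
    (m : PySem.Dict String (List (List (String × String))))
    (out : List (List (String × String))),
    m.keys.Nodup → (∀ u ∈ m.keys, m.getD u [] = []) →
    pvA_loop fuel m out N = out := by
  intro fuel
  induction fuel with
  | zero => intro m out _ _; rfl
  | succ f ih =>
    intro m out hnd hall
    show (if (out.length : Int) < N then
        pvA_loop f (pvA_pass m out).1 (pvA_pass m out).2 N else out) = out
    by_cases hlt : (out.length : Int) < N
    · rw [if_pos hlt]
      obtain ⟨h1, h2, h3⟩ := pv_pass_spec m out hnd
      have hnil : m.keys.filterMap (fun u => (m.getD u []).head?) = [] := by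
        refine List.filterMap_eq_nil_iff.mpr (fun u hu => ?_)
        rw [hall u hu]
        rfl
      rw [h1, hnil, List.append_nil]
      refine ih _ out (by rw [h2]; exact hnd) (fun u hu => ?_)
      rw [h2] at hu
      rw [h3 u, if_pos hu, hall u hu]
      rfl
    · rw [if_neg hlt]

lemma pv_loop_spec (N : Int) : ∀ (fuel : Nat)
    (m : PySem.Dict String (List (List (String × String))))
    (out : List (List (String × String))),
    m.keys.Nodup → (N - out.length).toNat ≤ fuel →
    pvA_loop fuel m out N
      = out ++ pvTakeRounds (N - out.length) (m.keys.map (fun u => m.getD u [])) := by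
  intro fuel
  induction fuel with
  | zero =>
    intro m out hnd hf
    have hz : N - (out.length : Int) ≤ 0 := by omega
    rw [pv_takeRounds_nonpos _ _ hz, List.append_nil]
    rfl
  | succ f ih =>
    intro m out hnd hf
    show (if (out.length : Int) < N then
        pvA_loop f (pvA_pass m out).1 (pvA_pass m out).2 N else out) = _
    by_cases hlt : (out.length : Int) < N
    · rw [if_pos hlt]
      obtain ⟨h1, h2, h3⟩ := pv_pass_spec m out hnd
      have hrows : (m.keys.map fun u => m.getD u []).filterMap List.head?
          = m.keys.filterMap (fun u => (m.getD u []).head?) := by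
        rw [List.filterMap_map]
        rfl
      by_cases hnil : m.keys.filterMap (fun u => (m.getD u []).head?) = []
      · have hallnil : ∀ u ∈ m.keys, m.getD u [] = [] := by
          intro u hu
          exact List.head?_eq_none_iff.mp (List.filterMap_eq_nil_iff.mp hnil u hu)
        rw [h1, hnil, List.append_nil]
        rw [pv_loop_spin N f _ out (by rw [h2]; exact hnd) ?_]
        · rw [pvTakeRounds, dif_pos (Or.inr (by rw [hrows]; exact hnil)), List.append_nil]
        · intro u hu
          rw [h2] at hu
          rw [h3 u, if_pos hu, hallnil u hu]
          rfl
      · have hlen : 0 < (m.keys.filterMap (fun u => (m.getD u []).head?)).length :=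
          List.length_pos_iff.mpr hnil
        have harg : (N - (((pvA_pass m out).2).length : Int)).toNat ≤ f := by
          rw [h1, List.length_append]
          push_cast
          omega
        rw [ih _ _ (by rw [h2]; exact hnd) harg]
        have hrows' : (pvA_pass m out).1.keys.map (fun u => (pvA_pass m out).1.getD u [])
            = (m.keys.map fun u => m.getD u []).map List.tail := by
          rw [h2, List.map_map]
          refine List.map_congr_left (fun u hu => ?_)
          rw [Function.comp_apply, h3 u, if_pos hu]
        rw [hrows', h1]
        have hcond : ¬(N - (out.length : Int) ≤ 0
            ∨ (m.keys.map fun u => m.getD u []).filterMap List.head? = []) := by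
          rw [hrows]
          push_neg
          exact ⟨by omega, hnil⟩
        conv_rhs => rw [pvTakeRounds, dif_neg hcond]
        rw [hrows, List.append_assoc]
        have hlen2 : (N - (((out ++ m.keys.filterMap (fun u => (m.getD u []).head?)).length : Nat) : Int))
            = N - (out.length : Int) - ((m.keys.filterMap (fun u => (m.getD u []).head?)).length : Int) := by
          rw [List.length_append]
          push_cast
          ring
        rw [hlen2]
    · rw [if_neg hlt]
      have hz : N - (out.length : Int) ≤ 0 := by omega
      rw [pv_takeRounds_nonpos _ _ hz, List.append_nil]

-- ---------- assembly ----------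

-- ===== VERDICT =====

theorem interleave_pending_prompts_spec : Claim_equal_interleave_pending_prompts := by
  unfold Claim_equal_interleave_pending_prompts
  intro ps tcol ucol N _dom _pre
  unfold Spec_interleave_pending_prompts interleave_pending_prompts interleave_pending_prompts_alt
  by_cases hle : (ps.length : Int) ≤ N
  · rw [if_pos hle, if_pos hle]
  · rw [if_neg hle, if_neg hle]
    dsimp only
    rw [pv_group_eq ps ucol]
    rw [pv_bfold_group ucol ps]
    dsimp only
    have hnd : (pvGroup ps ucol).keys.Nodup := pv_group_nodup ps ucol
    obtain ⟨hk2, hg2⟩ := pv_sortfold_spec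
      (fun l => PySem.List.sorted l (fun x => pvItemGet x tcol) false)
      (pvGroup ps ucol).keys (pvGroup ps ucol) hnd
      (fun u hu => (PySem.Dict.contains_iff_mem_keys _ _).mpr hu)
    have hfuel : (N - ((([] : List (List (String × String))).length : Nat) : Int)).toNat
        ≤ ps.length := by
      simp only [List.length_nil, Nat.cast_zero, sub_zero]
      omega
    rw [pv_loop_spec N ps.length _ [] (by rw [hk2]; exact hnd) hfuel, List.nil_append]
    simp only [List.length_nil, Nat.cast_zero, sub_zero]
    have hrows : ((pvGroup ps ucol).keys.foldl
          (fun acc u => acc.modify u []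
            (fun l => PySem.List.sorted l (fun x => pvItemGet x tcol) false))
          (pvGroup ps ucol)).keys.map
        (fun u => ((pvGroup ps ucol).keys.foldl
          (fun acc u => acc.modify u []
            (fun l => PySem.List.sorted l (fun x => pvItemGet x tcol) false))
          (pvGroup ps ucol)).getD u [])
        = (pvGroup ps ucol).keys.map
            (fun u => PySem.List.sorted ((pvGroup ps ucol).getD u [])
              (fun x => pvItemGet x tcol) false) := by
      rw [hk2]
      refine List.map_congr_left (fun u hu => ?_)
      simp only [hg2 u, if_pos hu]
    rw [hrows]
    rw [PySem.List.foldl_append_eq_flatMap, List.nil_append]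
    have hflat : (PySem.List.enumerate (pvGroup ps ucol).keys 0).flatMap
          (fun p => (PySem.List.enumerate (PySem.List.sorted ((pvGroup ps ucol).getD p.2 [])
              (fun x => pvItemGet x tcol) false) 0).map (fun q => (q.1, p.1, q.2)))
        = pvRowMajor 0 ((PySem.List.enumerate (pvGroup ps ucol).keys 0).map
            (fun p => (p.1, PySem.List.sorted ((pvGroup ps ucol).getD p.2 [])
              (fun x => pvItemGet x tcol) false))) := by
      rw [pvRowMajor, List.flatMap_map]
    rw [hflat]
    have hbounds : ∀ p ∈ (PySem.List.enumerate (pvGroup ps ucol).keys 0).map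
          (fun p => (p.1, PySem.List.sorted ((pvGroup ps ucol).getD p.2 [])
            (fun x => pvItemGet x tcol) false)),
        0 ≤ p.1 ∧ p.1 < (((pvGroup ps ucol).keys.length : Nat) : Int) := by
      intro p hp
      obtain ⟨q, hq, he⟩ := List.mem_map.mp hp
      obtain ⟨k, hk, he2⟩ := (PySem.List.mem_enumerate_iff (pvGroup ps ucol).keys 0 q).mp hq
      rw [← he, he2]
      constructor
      · simp
      · simp only [zero_add]
        exact_mod_cast hk
    have hpw : ((PySem.List.enumerate (pvGroup ps ucol).keys 0).map
          (fun p => (p.1, PySem.List.sorted ((pvGroup ps ucol).getD p.2 [])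
            (fun x => pvItemGet x tcol) false))).Pairwise (fun p q => p.1 < q.1) :=
      List.Pairwise.map _ (fun a b h => h)
        (PySem.List.pairwise_lt_enumerate (pvGroup ps ucol).keys 0)
    have hsorted : PySem.List.sorted
          (pvRowMajor 0 ((PySem.List.enumerate (pvGroup ps ucol).keys 0).map
            (fun p => (p.1, PySem.List.sorted ((pvGroup ps ucol).getD p.2 [])
              (fun x => pvItemGet x tcol) false))))
          (fun t => t.1 * (((pvGroup ps ucol).keys.length : Nat) : Int) + t.2.1) false
        = pvColJoin 0 ((PySem.List.enumerate (pvGroup ps ucol).keys 0).map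
            (fun p => (p.1, PySem.List.sorted ((pvGroup ps ucol).getD p.2 [])
              (fun x => pvItemGet x tcol) false))) :=
      PySem.List.sorted_eq_of_perm_of_pairwise_lt _ _ _
        (pv_perm_colJoin 0 _)
        (pv_pairwise_colJoin (((pvGroup ps ucol).keys.length : Nat) : Int) 0 _
          le_rfl hbounds hpw)
    rw [hsorted]
    by_cases hN : N ≤ 0
    · rw [if_pos hN, pv_takeRounds_nonpos _ _ hN]
    · rw [if_neg hN]
      have htot : (((PySem.List.enumerate (pvGroup ps ucol).keys 0).map
            (fun p => (p.1, PySem.List.sorted ((pvGroup ps ucol).getD p.2 [])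
              (fun x => pvItemGet x tcol) false))).map (fun p => p.2.length)).sum
          = ps.length := by
        rw [List.map_map]
        have h1 : ((PySem.List.enumerate (pvGroup ps ucol).keys 0).map
              ((fun (p : Int × List (List (String × String))) => p.2.length)
                ∘ (fun p => (p.1, PySem.List.sorted ((pvGroup ps ucol).getD p.2 [])
                  (fun x => pvItemGet x tcol) false))))
            = ((PySem.List.enumerate (pvGroup ps ucol).keys 0).map
                (fun q => ((pvGroup ps ucol).getD q.2 []).length)) := by
          refine List.map_congr_left (fun q _ => ?_)
          simp only [Function.comp_apply]
          exact PySem.List.length_sorted _ _ _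
        rw [h1]
        have h2 : ((PySem.List.enumerate (pvGroup ps ucol).keys 0).map
              (fun q => ((pvGroup ps ucol).getD q.2 []).length))
            = (((PySem.List.enumerate (pvGroup ps ucol).keys 0).map
                (fun q => q.2)).map (fun u => ((pvGroup ps ucol).getD u []).length)) := by
          rw [List.map_map]
          rfl
        rw [h2, PySem.List.map_snd_enumerate]
        exact pv_group_sum ucol ps
      have hNk : N - 1 = (((N - 1).toNat : Nat) : Int) := by omega
      rw [hNk, PySem.List.pyGetD_natCast]
      have hklt : (N - 1).toNat < (((PySem.List.enumerate (pvGroup ps ucol).keys 0).map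
            (fun p => (p.1, PySem.List.sorted ((pvGroup ps ucol).getD p.2 [])
              (fun x => pvItemGet x tcol) false))).map (fun p => p.2.length)).sum := by
        rw [htot]
        omega
      rw [pv_colJoin_filter_take (0, 0, ([] : List (String × String))) 0 _ _ hklt]
      have hrows2 : ((PySem.List.enumerate (pvGroup ps ucol).keys 0).map
            (fun p => (p.1, PySem.List.sorted ((pvGroup ps ucol).getD p.2 [])
              (fun x => pvItemGet x tcol) false))).map (fun p => p.2)
          = (pvGroup ps ucol).keys.map
              (fun u => PySem.List.sorted ((pvGroup ps ucol).getD u [])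
                (fun x => pvItemGet x tcol) false) := by
        rw [List.map_map]
        have h2 : ((PySem.List.enumerate (pvGroup ps ucol).keys 0).map
              ((fun (p : Int × List (List (String × String))) => p.2)
                ∘ (fun p => (p.1, PySem.List.sorted ((pvGroup ps ucol).getD p.2 [])
                  (fun x => pvItemGet x tcol) false))))
            = (((PySem.List.enumerate (pvGroup ps ucol).keys 0).map
                (fun q => q.2)).map (fun u => PySem.List.sorted ((pvGroup ps ucol).getD u [])
                  (fun x => pvItemGet x tcol) false)) := by
          rw [List.map_map]
          rfl
        rw [h2, PySem.List.map_snd_enumerate]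
      rw [hrows2]
      congr 1
      omega
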